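-- pv_equiv track=rewrite | github.com/yanhwee/aoc25 | day6/part2.py | solve
-- ===== SOURCE A (Python) =====
-- from operator import add, mul
--
-- def solve(lines: list[str]) -> int:
--     *lines, ops = lines
--     total = 0
--     acc = 0
--     op = None
--     for i in range(-1, len(ops)):
--         if i + 1 < len(ops) and ops[i + 1] != ' ':
--             total += acc
--             op = add if ops[i + 1] == '+' else mul
--             acc = 0 if ops[i + 1] == '+' else 1
--             continue
--         col = (l[i] for l in lines)
--         num = 0
--         for c in col:
--             if c == ' ':
--                 continue
--             c = int(c)
--             num = num * 10 + c
--         acc = op(acc, num)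
--     return total + acc
-- ===== SOURCE B (Python) =====
-- def solve(lines):
--     *grid, ops = lines
--     n = len(ops)
--
--     def colnum(i):
--         num = 0
--         for l in grid:
--             c = l[i]
--             if c != ' ':
--                 num = num * 10 + int(c)
--         return num
--
--     def segval(j, nxt):
--         plus = ops[j] == '+'
--         acc = 0 if plus else 1
--         for i in range(j, nxt - 1):
--             acc = acc + colnum(i) if plus else acc * colnum(i)
--         return acc
--
--     opcols = [j for j in range(n) if ops[j] != ' ']
--     bounds = opcols[1:] + [n + 1]
--     return sum(segval(j, nxt) for j, nxt in zip(opcols, bounds))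
-- ===== Notes on version B (the rewrite author's own statement) =====
-- stated objective: alternative
-- what changed: Replaces A's single stateful sweep over range(-1, len(ops)) carrying (total, acc, pending operator function) with a two-phase decomposition: first locate the operator columns and split the column range into segments, then parse each segment's columns independently and fold/sum the segment values.
import Mathlib
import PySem

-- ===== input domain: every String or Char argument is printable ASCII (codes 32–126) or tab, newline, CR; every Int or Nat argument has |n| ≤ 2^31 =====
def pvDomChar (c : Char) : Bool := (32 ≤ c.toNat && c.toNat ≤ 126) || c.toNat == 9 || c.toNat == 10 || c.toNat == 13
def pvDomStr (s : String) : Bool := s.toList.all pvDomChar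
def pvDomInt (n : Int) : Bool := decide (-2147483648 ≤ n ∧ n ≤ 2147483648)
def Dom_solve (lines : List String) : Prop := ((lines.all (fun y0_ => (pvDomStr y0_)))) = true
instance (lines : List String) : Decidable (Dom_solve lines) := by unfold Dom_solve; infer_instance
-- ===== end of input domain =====

-- B replaces A's single stateful sweep (running total / acc / pending operator over range(-1,len(ops)))
-- by a two-phase decomposition: find the operator columns, split the columns into segments, fold each
-- segment independently and sum; same cost, different structure (return value only; neither mutates input).


-- ===== PORT A =====
-- int(c) for a digit character (Pre_ guarantees digits; exact there)
def pvDigit (c : Char) : Int := (c.toNat : Int) - 48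

-- A's inner loop: num = num*10 + int(c) over column i of the grid, skipping spaces
-- (an out-of-range l[i] is an excluded IndexError; the port just keeps num there)
def pvColA (grid : List String) (i : Int) : Int :=
  grid.foldl (fun num l =>
    match PySem.Str.pyGet? l i with
    | none => num
    | some c => if c = ' ' then num else num * 10 + pvDigit c) 0

-- one iteration of A's for-loop; state = (total, acc, op); op none = Python's op = None
-- (applying a none op is Python's TypeError, excluded by Pre_; the port returns 0 there)
def pvStepA (grid : List String) (ops : List Char)
    (st : Int × Int × Option (Int → Int → Int)) (i : Int) :
    Int × Int × Option (Int → Int → Int) :=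
  if i + 1 < (ops.length : Int) ∧ (PySem.List.pyGet? ops (i + 1)).getD ' ' ≠ ' ' then
    (st.1 + st.2.1,
     if (PySem.List.pyGet? ops (i + 1)).getD ' ' = '+' then (0 : Int) else 1,
     some (if (PySem.List.pyGet? ops (i + 1)).getD ' ' = '+'
           then (fun a b => a + b) else (fun a b => a * b)))
  else
    (st.1, (st.2.2.getD (fun _ _ => 0)) st.2.1 (pvColA grid i), st.2.2)

def solve (lines : List String) : Int :=
  let grid := lines.dropLast
  let ops := (lines.getLastD "").toList
  let st := (PySem.List.pyRange (-1) (ops.length : Int) 1).foldl (pvStepA grid ops) (0, 0, none)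
  st.1 + st.2.1

-- ===== PORT B =====
-- Source B's colnum(i): parse column i (0-based, in range under Pre_)
def pvColB (grid : List String) (i : Nat) : Int :=
  grid.foldl (fun num l =>
    if l.toList.getD i ' ' ≠ ' ' then num * 10 + pvDigit (l.toList.getD i ' ') else num) 0

-- Source B's segval(j, nxt): fold columns j .. nxt-2 with the operator found at column j
def pvSegVal (grid : List String) (ops : List Char) (j nxt : Nat) : Int :=
  let plus := ops.getD j ' ' = '+'
  (List.range' j (nxt - 1 - j)).foldl
    (fun acc i => if plus then acc + pvColB grid i else acc * pvColB grid i)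
    (if plus then 0 else 1)

-- Source B's sum(segval(j, nxt) for j, nxt in zip(opcols, bounds))
def pvSegSum (grid : List String) (ops : List Char) : List (Nat × Nat) → Int
  | [] => 0
  | (j, nxt) :: rest => pvSegVal grid ops j nxt + pvSegSum grid ops rest

def solve_alt (lines : List String) : Int :=
  let grid := lines.dropLast
  let ops := (lines.getLastD "").toList
  let n := ops.length
  let opcols := (List.range n).filter (fun j => ops.getD j ' ' ≠ ' ')
  pvSegSum grid ops (opcols.zip (opcols.drop 1 ++ [n + 1]))

-- ===== PRECONDITION & SPEC =====
-- Exactly the inputs where Python A returns: lines nonempty (unpack), the operator line nonempty and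
-- not starting with a space (else op stays None: TypeError), and in every column A actually reads
-- (those not immediately left of an operator) each grid line is long enough (IndexError) and holds a
-- digit or space (ValueError).
def Pre_solve (lines : List String) : Prop :=
  lines ≠ [] ∧
  (lines.getLastD "").toList ≠ [] ∧
  (lines.getLastD "").toList.getD 0 ' ' ≠ ' ' ∧
  ∀ i < (lines.getLastD "").toList.length,
    (i + 1 = (lines.getLastD "").toList.length ∨
     (lines.getLastD "").toList.getD (i + 1) ' ' = ' ') →
    ∀ l ∈ lines.dropLast,
      i < l.toList.length ∧ (l.toList.getD i ' ' = ' ' ∨ (l.toList.getD i ' ').isDigit)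

instance (lines : List String) : Decidable (Pre_solve lines) := by
  unfold Pre_solve; infer_instance

def pvWitness_solve : List String := ["12 34", "*2 11"]

def Spec_solve (lines : List String) (out : Int) : Prop := out = solve_alt lines
instance (lines : List String) (out : Int) : Decidable (Spec_solve lines out) := by
  unfold Spec_solve; infer_instance

-- ===== CLAIM (what is proved, stated in full; the proofs are below) =====
def Claim_equal_solve : Prop :=
  ∀ (lines : List String), Dom_solve lines → Pre_solve lines → Spec_solve lines (solve lines)

-- ===== LEMMAS AND PROOFS =====

-- proof-side vocabulary for A's segment state
def seedC (c : Char) : Int := if c = '+' then 0 else 1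
def opfC (c : Char) : Int → Int → Int := if c = '+' then (fun a b => a + b) else (fun a b => a * b)
def appC (c : Char) (acc v : Int) : Int := if c = '+' then acc + v else acc * v

-- first operator column ≥ k (ops.length + 1 if none)
def pvNxt (ops : List Char) (k : Nat) : Nat :=
  if k < ops.length then
    if ops.getD k ' ' ≠ ' ' then k else pvNxt ops (k + 1)
  else ops.length + 1
termination_by ops.length - k

-- operator columns ≥ k
def pvOpcols (ops : List Char) (k : Nat) : List Nat :=
  if k < ops.length then
    (if ops.getD k ' ' ≠ ' ' then [k] else []) ++ pvOpcols ops (k + 1)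
  else []
termination_by ops.length - k

def pvZip (ops : List Char) (k : Nat) : List (Nat × Nat) :=
  (pvOpcols ops k).zip ((pvOpcols ops k).drop 1 ++ [ops.length + 1])

-- A's remaining fold from column k with current segment operator c and accumulator acc
def pvTail (grid : List String) (ops : List Char) (c : Char) (acc : Int) (k : Nat) : Int :=
  if k < ops.length then
    if k + 1 < ops.length ∧ ops.getD (k + 1) ' ' ≠ ' ' then
      acc + pvTail grid ops (ops.getD (k + 1) ' ') (seedC (ops.getD (k + 1) ' ')) (k + 1)
    else
      pvTail grid ops c (appC c acc (pvColB grid k)) (k + 1)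
  else acc
termination_by ops.length - k

lemma colAB (grid : List String) (k : Nat) : pvColA grid (k : Int) = pvColB grid k := by
  unfold pvColA pvColB
  congr 1
  funext num l
  simp only [PySem.Str.pyGet?_natCast, List.getD_eq_getElem?_getD]
  cases h : l.toList[k]? with
  | none => simp
  | some c =>
    by_cases hc : c = ' ' <;> simp [hc]

lemma stepA_pos (grid : List String) (ops : List Char) (st : Int × Int × Option (Int → Int → Int))
    (i : Int) (h : i + 1 < (ops.length : Int) ∧ (PySem.List.pyGet? ops (i + 1)).getD ' ' ≠ ' ') :
    pvStepA grid ops st i =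
      (st.1 + st.2.1,
       if (PySem.List.pyGet? ops (i + 1)).getD ' ' = '+' then (0 : Int) else 1,
       some (if (PySem.List.pyGet? ops (i + 1)).getD ' ' = '+'
             then (fun a b => a + b) else (fun a b => a * b))) := by
  unfold pvStepA; rw [if_pos h]

lemma stepA_neg (grid : List String) (ops : List Char) (st : Int × Int × Option (Int → Int → Int))
    (i : Int) (h : ¬ (i + 1 < (ops.length : Int) ∧ (PySem.List.pyGet? ops (i + 1)).getD ' ' ≠ ' ')) :
    pvStepA grid ops st i = (st.1, (st.2.2.getD (fun _ _ => 0)) st.2.1 (pvColA grid i), st.2.2) := by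
  unfold pvStepA; rw [if_neg h]

lemma le_pvNxt (ops : List Char) (k : Nat) (hk : k ≤ ops.length + 1) : k ≤ pvNxt ops k := by
  unfold pvNxt
  split
  · split
    · exact le_refl _
    · exact le_trans (Nat.le_succ _) (le_pvNxt ops (k + 1) (by omega))
  · omega
termination_by ops.length - k

lemma headD_pvOpcols (ops : List Char) (k : Nat) :
    (pvOpcols ops k).headD (ops.length + 1) = pvNxt ops k := by
  unfold pvOpcols pvNxt
  split
  · split
    · simp
    · simpa using headD_pvOpcols ops (k + 1)
  · simp
termination_by ops.length - k

lemma zip_bounds_cons {n a : Nat} (l : List Nat) :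
    (a :: l).zip ((a :: l).drop 1 ++ [n + 1]) =
      (a, l.headD (n + 1)) :: l.zip (l.drop 1 ++ [n + 1]) := by
  cases l <;> simp

-- A's fold over the remaining columns computes total + pvTail
lemma foldA_tail (grid : List String) (ops : List Char) :
    ∀ m k, m = ops.length - k → ∀ (c : Char) (total acc : Int),
    (let st := ((List.range' k m).map (fun (j : Nat) => (j : Int))).foldl
        (pvStepA grid ops) (total, acc, some (opfC c));
     st.1 + st.2.1) = total + pvTail grid ops c acc k := by
  intro m
  induction m with
  | zero =>
    intro k hk c total acc
    rw [pvTail]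
    simp only [List.range'_zero, List.map_nil, List.foldl_nil]
    have : ¬ k < ops.length := by omega
    simp [this]
  | succ m ih =>
    intro k hk c total acc
    have hkn : k < ops.length := by omega
    rw [List.range'_succ]
    simp only [List.map_cons, List.foldl_cons]
    have hget : (PySem.List.pyGet? ops ((k : Int) + 1)).getD ' ' = ops.getD (k + 1) ' ' := by
      have : (k : Int) + 1 = ((k + 1 : Nat) : Int) := by push_cast; ring
      rw [this, PySem.List.pyGet?_natCast, List.getD_eq_getElem?_getD]
    rw [pvTail]
    simp only [hkn, if_true]
    by_cases hc : k + 1 < ops.length ∧ ops.getD (k + 1) ' ' ≠ ' '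
    · have hcond : (k : Int) + 1 < (ops.length : Int) ∧
          (PySem.List.pyGet? ops ((k : Int) + 1)).getD ' ' ≠ ' ' := by
        refine ⟨by exact_mod_cast (by omega : ((k+1:Nat):Int) < (ops.length : Int)), ?_⟩
        rw [hget]; exact hc.2
      rw [stepA_pos grid ops _ _ hcond, if_pos hc]
      rw [hget]
      have := ih (k + 1) (by omega) (ops.getD (k + 1) ' ') (total + acc)
        (seedC (ops.getD (k + 1) ' '))
      simp only at this
      rw [show (if ops.getD (k + 1) ' ' = '+' then (0:Int) else 1) = seedC (ops.getD (k+1) ' ') from rfl,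
          show (if ops.getD (k + 1) ' ' = '+' then (fun a b => a + b) else fun a b => a * b) = opfC (ops.getD (k+1) ' ') from rfl,
          this]
      ring
    · have hcond : ¬ ((k : Int) + 1 < (ops.length : Int) ∧
          (PySem.List.pyGet? ops ((k : Int) + 1)).getD ' ' ≠ ' ') := by
        rw [hget]
        intro ⟨h1, h2⟩
        exact hc ⟨by exact_mod_cast h1, h2⟩
      rw [stepA_neg grid ops _ _ hcond, if_neg hc]
      have happ : (Option.getD (some (opfC c)) (fun _ _ => 0)) acc (pvColA grid (k : Int)) =
          appC c acc (pvColB grid k) := by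
        rw [colAB]
        unfold opfC appC
        by_cases h : c = '+' <;> simp [h]
      simp only [Option.getD_some] at happ ⊢
      rw [happ]
      exact ih (k + 1) (by omega) c total (appC c acc (pvColB grid k))

-- pvTail equals B's segment decomposition
lemma tail_seg (grid : List String) (ops : List Char) :
    ∀ m k, m = ops.length - k → ∀ (c : Char) (acc : Int),
    pvTail grid ops c acc k =
      (List.range' k (pvNxt ops (k + 1) - 1 - k)).foldl
          (fun acc i => appC c acc (pvColB grid i)) acc +
        pvSegSum grid ops (pvZip ops (k + 1)) := by
  intro m
  induction m with
  | zero =>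
    intro k hk c acc
    have hkn : ¬ k < ops.length := by omega
    rw [pvTail, if_neg hkn]
    have h1 : pvNxt ops (k + 1) = ops.length + 1 := by
      rw [pvNxt, if_neg (by omega)]
    have h2 : pvOpcols ops (k + 1) = [] := by
      rw [pvOpcols, if_neg (by omega)]
    have h0 : ops.length + 1 - 1 - k = 0 := by omega
    rw [h1, pvZip, h2, h0]
    simp [pvSegSum]
  | succ m ih =>
    intro k hk c acc
    have hkn : k < ops.length := by omega
    rw [pvTail, if_pos hkn]
    by_cases hc : k + 1 < ops.length ∧ ops.getD (k + 1) ' ' ≠ ' '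
    · rw [if_pos hc]
      have hnxt : pvNxt ops (k + 1) = k + 1 := by
        rw [pvNxt, if_pos hc.1, if_pos hc.2]
      have hop : pvOpcols ops (k + 1) = (k + 1) :: pvOpcols ops (k + 2) := by
        rw [pvOpcols, if_pos hc.1, if_pos hc.2]; rfl
      have hzip : pvZip ops (k + 1) = (k + 1, pvNxt ops (k + 2)) :: pvZip ops (k + 2) := by
        rw [pvZip, hop, zip_bounds_cons, headD_pvOpcols, pvZip]
      rw [hnxt, hzip]
      simp only [Nat.add_sub_cancel, Nat.sub_self, List.range'_zero, List.foldl_nil, pvSegSum]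
      rw [ih (k + 1) (by omega) (ops.getD (k + 1) ' ') (seedC (ops.getD (k + 1) ' '))]
      have hseg : pvSegVal grid ops (k + 1) (pvNxt ops (k + 2)) =
          (List.range' (k + 1) (pvNxt ops (k + 2) - 1 - (k + 1))).foldl
            (fun acc i => appC (ops.getD (k + 1) ' ') acc (pvColB grid i))
            (seedC (ops.getD (k + 1) ' ')) := by
        unfold pvSegVal seedC appC
        by_cases h : ops.getD (k + 1) ' ' = '+'
        · simp only [h, if_true]
        · simp only [h, if_false]
      rw [hseg]
    · rw [if_neg hc]
      have hstep : pvNxt ops (k + 1) = pvNxt ops (k + 2) ∧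
          pvOpcols ops (k + 1) = pvOpcols ops (k + 2) := by
        by_cases h1 : k + 1 < ops.length
        · have h2 : ¬ ops.getD (k + 1) ' ' ≠ ' ' := fun h => hc ⟨h1, h⟩
          constructor
          · rw [pvNxt, if_pos h1, if_neg h2]
          · rw [pvOpcols, if_pos h1, if_neg h2]; rfl
        · constructor
          · rw [pvNxt, if_neg h1, pvNxt, if_neg (by omega)]
          · rw [pvOpcols, if_neg h1, pvOpcols, if_neg (by omega)]
      have hge : k + 2 ≤ pvNxt ops (k + 1) := by
        rw [hstep.1]; exact le_pvNxt ops (k + 2) (by omega)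
      have hrange : List.range' k (pvNxt ops (k + 1) - 1 - k) =
          k :: List.range' (k + 1) (pvNxt ops (k + 2) - 1 - (k + 1)) := by
        rw [show pvNxt ops (k + 1) - 1 - k = (pvNxt ops (k + 2) - 1 - (k + 1)) + 1 by
              rw [← hstep.1]; omega]
        rw [List.range'_succ]
      rw [hrange]
      simp only [List.foldl_cons]
      have hzip : pvZip ops (k + 1) = pvZip ops (k + 2) := by
        rw [pvZip, hstep.2, pvZip]
      rw [hzip]
      exact ih (k + 1) (by omega) c (appC c acc (pvColB grid k))

lemma opcols_from (ops : List Char) :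
    ∀ m k, m = ops.length - k →
    pvOpcols ops k = (List.range' k m).filter (fun j => ops.getD j ' ' ≠ ' ') := by
  intro m
  induction m with
  | zero =>
    intro k hk
    rw [pvOpcols, if_neg (by omega)]
    simp
  | succ m ih =>
    intro k hk
    rw [pvOpcols, if_pos (by omega), List.range'_succ]
    rw [List.filter_cons, ih (k + 1) (by omega)]
    by_cases h : ops.getD k ' ' = ' '
    · simp only [List.getD_eq_getElem?_getD] at h
      simp [h]
    · simp only [List.getD_eq_getElem?_getD] at h
      simp [h]

-- ===== VERDICT (by name: the statement is the Claim_ definition above) =====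
theorem solve_spec : Claim_equal_solve := by
  intro lines _hdom hpre
  obtain ⟨hne, hops, hhead, _hcols⟩ := hpre
  show solve lines = solve_alt lines
  unfold solve solve_alt
  simp only []
  set grid := lines.dropLast with hgrid
  set ops := (lines.getLastD "").toList with hopsdef
  have hn : 1 ≤ ops.length := by
    cases h : ops with
    | nil => exact absurd h hops
    | cons a l => simp
  -- A side: peel off the i = -1 iteration
  have hsplit : PySem.List.pyRange (-1) (ops.length : Int) 1 =
      -1 :: PySem.List.pyRange 0 (ops.length : Int) 1 := by
    rw [PySem.List.pyRange_one_cons (by exact_mod_cast by omega : (-1 : Int) < (ops.length : Int))]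
    norm_num
  have hc0 : (PySem.List.pyGet? ops ((-1 : Int) + 1)).getD ' ' = ops.getD 0 ' ' := by
    rw [show ((-1 : Int) + 1) = ((0 : Nat) : Int) by norm_num,
        PySem.List.pyGet?_natCast, List.getD_eq_getElem?_getD]
  have hcond : (-1 : Int) + 1 < (ops.length : Int) ∧
      (PySem.List.pyGet? ops ((-1 : Int) + 1)).getD ' ' ≠ ' ' := by
    refine ⟨by exact_mod_cast by omega, ?_⟩
    rw [hc0]; exact hhead
  rw [hsplit]
  simp only [List.foldl_cons]
  rw [stepA_pos grid ops _ _ hcond, hc0]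
  simp only [add_zero]
  -- the rest of the range as mapped naturals
  have hrange : PySem.List.pyRange 0 (ops.length : Int) 1 =
      (List.range' 0 ops.length).map (fun (j : Nat) => (j : Int)) := by
    rw [PySem.List.pyRange_one, ← List.range_eq_range']
    simp
  rw [hrange,
      show (if ops.getD 0 ' ' = '+' then (0:Int) else 1) = seedC (ops.getD 0 ' ') from rfl,
      show (if ops.getD 0 ' ' = '+' then (fun a b => a + b) else fun a b => a * b) = opfC (ops.getD 0 ' ') from rfl]
  have hA := foldA_tail grid ops ops.length 0 (by omega) (ops.getD 0 ' ') 0 (seedC (ops.getD 0 ' '))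
  simp only [] at hA
  rw [hA, zero_add]
  -- B side: opcols = 0 :: pvOpcols ops 1
  have hopc : (List.range ops.length).filter (fun j => ops.getD j ' ' ≠ ' ') = pvOpcols ops 0 := by
    rw [opcols_from ops ops.length 0 (by omega), List.range_eq_range']
  rw [hopc]
  have hop0 : pvOpcols ops 0 = 0 :: pvOpcols ops 1 := by
    rw [pvOpcols, if_pos (by omega), if_pos hhead]; rfl
  rw [hop0, zip_bounds_cons, headD_pvOpcols]
  show pvTail grid ops (ops.getD 0 ' ') (seedC (ops.getD 0 ' ')) 0 =
    pvSegSum grid ops ((0, pvNxt ops 1) :: pvZip ops 1)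
  rw [tail_seg grid ops ops.length 0 (by omega)]
  rw [pvSegSum]
  have hseg : pvSegVal grid ops 0 (pvNxt ops 1) =
      (List.range' 0 (pvNxt ops (0 + 1) - 1 - 0)).foldl
        (fun acc i => appC (ops.getD 0 ' ') acc (pvColB grid i))
        (seedC (ops.getD 0 ' ')) := by
    unfold pvSegVal seedC appC
    by_cases h : ops.getD 0 ' ' = '+'
    · simp only [h, if_true]
    · simp only [h, if_false]
  rw [hseg]
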